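-- pv_equiv track=rewrite | github.com/jjqojj/MisionTIC2022_C1_Python_Practice | Ejercicio_5_vajilla.py | mefaltandelmaterial
-- ===== SOURCE A (Python) =====
-- def mefaltandelmaterial(X_codigos:list,Y_materiales:list,Z_material):
--     dicc={}
--     faltantes=[]
--     for i in range(len(Y_materiales)):
--         dicc[i]=Y_materiales[i]
--     for j in X_codigos:
--         for clave,material in dicc.items():
--             if Z_material==material and j==clave:
--                 faltantes.append(j)
--     return faltantes
-- ===== SOURCE B (Python) =====
-- def mefaltandelmaterial(X_codigos: list, Y_materiales: list, Z_material):
--     matching = {i for i, m in enumerate(Y_materiales) if m == Z_material}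
--     return [j for j in X_codigos if j in matching]
-- ===== Notes on version B (the rewrite author's own statement) =====
-- stated objective: faster
-- what changed: Replaces A's dict of all index->material pairs and the nested per-code scan over every dict item with one filtered pass over enumerate(Y_materiales) building a set of matching indices, followed by a single membership-filter pass over X_codigos.
import Mathlib
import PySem

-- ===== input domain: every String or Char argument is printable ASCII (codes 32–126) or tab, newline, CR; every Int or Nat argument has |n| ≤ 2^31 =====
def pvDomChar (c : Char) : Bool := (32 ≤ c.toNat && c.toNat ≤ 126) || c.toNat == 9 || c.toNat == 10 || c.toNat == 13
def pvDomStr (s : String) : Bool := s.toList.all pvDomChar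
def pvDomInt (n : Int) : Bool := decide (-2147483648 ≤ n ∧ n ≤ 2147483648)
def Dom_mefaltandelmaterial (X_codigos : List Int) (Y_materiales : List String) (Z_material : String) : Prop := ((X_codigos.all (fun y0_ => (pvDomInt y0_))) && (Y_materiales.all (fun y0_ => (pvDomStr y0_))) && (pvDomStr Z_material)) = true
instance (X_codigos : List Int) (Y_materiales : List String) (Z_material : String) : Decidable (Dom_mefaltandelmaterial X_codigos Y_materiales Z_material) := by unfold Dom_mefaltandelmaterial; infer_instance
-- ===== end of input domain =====

-- B replaces A's full index->material dict and nested per-code scan by a precomputed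
-- set of matching indices and a single membership pass (objective: faster).

-- ===== PORT A =====
-- dicc[i] = Y_materiales[i] for i in range(len(Y_materiales)); then for each j in
-- X_codigos a scan over all dict items appending j on a match.
def mefaltandelmaterial (X_codigos : List Int) (Y_materiales : List String) (Z_material : String) : List Int :=
  let dicc : PySem.Dict Int String :=
    (PySem.List.pyRange 0 (Y_materiales.length : Int) 1).foldl
      (fun d i => d.insert i (PySem.List.pyGetD Y_materiales i "")) PySem.Dict.empty
  X_codigos.foldl (fun faltantes j =>
    dicc.items.foldl (fun acc p =>
      if Z_material == p.2 && j == p.1 then acc ++ [j] else acc) faltantes) []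

-- ===== PORT B =====
-- matching = {i for i, m in enumerate(Y_materiales) if m == Z_material};
-- return [j for j in X_codigos if j in matching]
def mefaltandelmaterial_alt (X_codigos : List Int) (Y_materiales : List String) (Z_material : String) : List Int :=
  let matching : PySem.Set Int :=
    PySem.Set.ofList ((PySem.List.enumerate Y_materiales 0).filterMap
      (fun p => if p.2 = Z_material then some p.1 else none))
  X_codigos.filter (fun j => PySem.Set.contains matching j)

-- ===== PRECONDITION & SPEC =====
def Spec_mefaltandelmaterial (X_codigos : List Int) (Y_materiales : List String) (Z_material : String) (out : List Int) : Prop := out = mefaltandelmaterial_alt X_codigos Y_materiales Z_material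
instance (X_codigos : List Int) (Y_materiales : List String) (Z_material : String) (out : List Int) : Decidable (Spec_mefaltandelmaterial X_codigos Y_materiales Z_material out) := by unfold Spec_mefaltandelmaterial; infer_instance

-- ===== CLAIM (what is proved, stated in full; the proofs are below) =====
def Claim_equal_mefaltandelmaterial : Prop := ∀ (X_codigos : List Int) (Y_materiales : List String) (Z_material : String), Dom_mefaltandelmaterial X_codigos Y_materiales Z_material → Spec_mefaltandelmaterial X_codigos Y_materiales Z_material (mefaltandelmaterial X_codigos Y_materiales Z_material)

-- ===== LEMMAS AND PROOFS =====

-- A's dict is exactly enumerate(Y) as an items list.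
theorem dicc_items (Y : List String) :
    ((PySem.List.pyRange 0 (Y.length : Int) 1).foldl
      (fun d i => d.insert i (PySem.List.pyGetD Y i "")) PySem.Dict.empty).items
    = PySem.List.enumerate Y 0 := by
  rw [PySem.Dict.items_foldl_insert_fresh (PySem.List.pyRange 0 (Y.length : Int) 1)
        (fun a => a) (fun i => PySem.List.pyGetD Y i "") PySem.Dict.empty
        (fun a _ => PySem.Dict.contains_empty a)
        (by simpa using PySem.List.nodup_pyRange_one 0 (Y.length : Int)),
      PySem.List.enumerate_eq_map_pyRange Y ""]
  simp [pysem, PySem.Dict.empty]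

-- the filter A's inner scan performs keeps at most the one pair (j, Z).
theorem filter_enumerate (Y : List String) (Z : String) (j : Int) :
    ∀ s : Int, (PySem.List.enumerate Y s).filter (fun p => Z == p.2 && j == p.1)
      = if (j, Z) ∈ PySem.List.enumerate Y s then [(j, Z)] else [] := by
  induction Y with
  | nil => intro s; simp [PySem.List.enumerate_nil]
  | cons y Y ih =>
    intro s
    rw [PySem.List.enumerate_cons]
    by_cases h : Z = y ∧ j = s
    · obtain ⟨hz, hj⟩ := h
      subst hz; subst hj
      have hnot : (j, Z) ∉ PySem.List.enumerate Y (j + 1) := by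
        intro hmem
        rcases (PySem.List.mem_enumerate_iff _ _ _).1 hmem with ⟨k, hk, hp⟩
        have : j = j + 1 + (k : Int) := congrArg Prod.fst hp
        omega
      simp [ih (j + 1), hnot]
    · have hcond : (Z == y && j == s) = false := by
        rcases not_and_or.1 h with h' | h' <;> simp [h']
      have hne : (j, Z) ≠ (s, y) := by
        intro he
        exact h ⟨congrArg Prod.snd he, congrArg Prod.fst he⟩
      rw [List.filter_cons]
      simp only [hcond, Bool.false_eq_true, if_false]
      rw [ih (s + 1)]
      simp [List.mem_cons, hne]

-- A's inner scan over enumerate(Y) appends j exactly when (j, Z) occurs there.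
theorem inner_fold (Y : List String) (Z : String) (j : Int) (acc : List Int) :
    (PySem.List.enumerate Y 0).foldl
      (fun acc p => if Z == p.2 && j == p.1 then acc ++ [j] else acc) acc
    = acc ++ (if (j, Z) ∈ PySem.List.enumerate Y 0 then [j] else []) := by
  rw [PySem.List.foldl_append_if (fun p => Z == p.2 && j == p.1) (fun _ => j)
        (PySem.List.enumerate Y 0) acc,
      filter_enumerate Y Z j 0]
  by_cases h : (j, Z) ∈ PySem.List.enumerate Y 0 <;> simp [h]

-- B's membership test computes the same condition.
theorem matching_contains (Y : List String) (Z : String) (j : Int) :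
    PySem.Set.contains
      (PySem.Set.ofList ((PySem.List.enumerate Y 0).filterMap
        (fun p => if p.2 = Z then some p.1 else none))) j
    = decide ((j, Z) ∈ PySem.List.enumerate Y 0) := by
  have hset : j ∈ (PySem.Set.ofList ((PySem.List.enumerate Y 0).filterMap
        (fun p => if p.2 = Z then some p.1 else none)))
      ↔ (j, Z) ∈ PySem.List.enumerate Y 0 := by
    rw [PySem.Set.mem_ofList, List.mem_filterMap]
    constructor
    · rintro ⟨p, hp, hf⟩
      by_cases h2 : p.2 = Z
      · simp only [h2, if_true, Option.some.injEq] at hf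
        have hpe : p = (j, Z) := by
          cases p with | mk a b => simp_all
        exact hpe ▸ hp
      · simp [h2] at hf
    · intro hmem; exact ⟨(j, Z), hmem, by simp⟩
  by_cases hm : (j, Z) ∈ PySem.List.enumerate Y 0
  · rw [decide_eq_true hm]
    exact (PySem.Set.contains_iff _ _).2 (hset.2 hm)
  · rw [decide_eq_false hm]
    exact Bool.eq_false_iff.mpr
      (fun hc => hm (hset.1 ((PySem.Set.contains_iff _ _).1 hc)))

-- A's outer loop is the filter B performs.
theorem outer_fold (Y : List String) (Z : String) :
    ∀ (X : List Int) (acc : List Int),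
      X.foldl (fun faltantes j =>
        (PySem.List.enumerate Y 0).foldl
          (fun acc p => if Z == p.2 && j == p.1 then acc ++ [j] else acc) faltantes) acc
      = acc ++ X.filter (fun j => decide ((j, Z) ∈ PySem.List.enumerate Y 0)) := by
  intro X
  induction X with
  | nil => intro acc; simp
  | cons x X ih =>
    intro acc
    rw [List.foldl_cons, inner_fold Y Z x acc, ih, List.filter_cons]
    by_cases h : (x, Z) ∈ PySem.List.enumerate Y 0 <;> simp [h]

-- ===== VERDICT (by name: the statement is the Claim_ definition above) =====
theorem mefaltandelmaterial_spec : Claim_equal_mefaltandelmaterial := by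
  intro X Y Z _
  unfold Spec_mefaltandelmaterial mefaltandelmaterial mefaltandelmaterial_alt
  simp only [dicc_items Y]
  rw [outer_fold Y Z X []]
  simp only [List.nil_append]
  exact (List.filter_congr (fun j _ => (matching_contains Y Z j).symm))
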